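-- pv_equiv track=rewrite | github.com/ponalex/fperson | auxiliary/dataproc.py | key_map_to_list
-- ===== SOURCE A (Python) =====
-- def key_map_to_list(data:dict, grid=(3,2))->list:
--     res=list()
--     temp_row=list()
--     for i in data.keys():
--         text="["+data[i]+"]"+" : "+"<"+str(i)+">"
--         res.append(text)
--     for i in range(grid[1]):
--         temp_col=list()
--         for j in range(grid[0]):
--             if len(res)>0:
--                 temp_col.append(res.pop(0))
--             else:
--                 temp_col.append("")
--         a=temp_col.copy()
--         temp_row.append(a)
--     return temp_row
-- ===== SOURCE B (Python) =====
-- def key_map_to_list(data: dict, grid=(3, 2)) -> list: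
--     res = ["[" + v + "]" + " : " + "<" + str(k) + ">" for k, v in data.items()]
--     cols = max(0, grid[0])
--     rows = max(0, grid[1])
--     total = cols * rows
--     padded = res[:total] + [""] * max(0, total - len(res))
--     return [padded[r * cols:(r + 1) * cols] for r in range(rows)]
-- ===== Notes on version B (the rewrite author's own statement) =====
-- stated objective: simpler
-- what changed: A fills the grid cell by cell with a guarded pop(0) FIFO double loop; B formats the entries once, pads the list to cols*rows with empty strings, and produces the rows by arithmetic slicing in a comprehension.
import Mathlib
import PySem

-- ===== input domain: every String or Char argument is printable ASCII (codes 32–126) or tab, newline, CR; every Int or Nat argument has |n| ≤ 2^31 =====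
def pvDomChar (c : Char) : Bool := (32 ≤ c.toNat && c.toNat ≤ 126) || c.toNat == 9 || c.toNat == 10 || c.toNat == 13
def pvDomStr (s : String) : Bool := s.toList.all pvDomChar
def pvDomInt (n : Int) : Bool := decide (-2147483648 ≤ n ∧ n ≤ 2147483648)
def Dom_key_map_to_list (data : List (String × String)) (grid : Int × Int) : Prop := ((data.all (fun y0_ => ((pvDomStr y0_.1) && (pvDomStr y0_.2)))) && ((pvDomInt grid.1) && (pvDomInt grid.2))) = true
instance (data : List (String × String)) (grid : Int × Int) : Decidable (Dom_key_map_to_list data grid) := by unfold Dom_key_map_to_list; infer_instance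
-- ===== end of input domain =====

-- B replaces A's guarded pop(0)-per-cell double loop by arithmetic chunking of a padded list (objective: simpler).

-- ===== PORT A =====
-- one cell of A's inner loop: 'if len(res)>0: temp_col.append(res.pop(0)) else: temp_col.append("")'
def kmlCell (s : List String × List String) : List String × List String :=
  if s.1.length > 0 then
    match PySem.List.pop? s.1 0 with
    | some pr => (pr.2, s.2 ++ [pr.1])
    | none => s            -- unreachable under the length guard
  else (s.1, s.2 ++ [""])

-- one row of A's outer loop (temp_col.copy() is the identity on the value)
def kmlRow (g0 : Int) (s : List String × List (List String)) : List String × List (List String) :=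
  let inner := (PySem.List.pyRange 0 g0 1).foldl (fun t _ => kmlCell t) (s.1, ([] : List String))
  (inner.1, s.2 ++ [inner.2])

def key_map_to_list (data : List (String × String)) (grid : Int × Int) : List (List String) :=
  let d := PySem.Dict.ofList data
  -- 'for i in data.keys(): res.append("["+data[i]+"]"+" : "+"<"+str(i)+">")'; i ∈ keys so data[i] never raises,
  -- ported as getD; str(i) on a str key is the identity
  let res := d.keys.foldl (fun r i => r ++ ["[" ++ d.getD i "" ++ "]" ++ " : " ++ "<" ++ i ++ ">"]) []
  let out := (PySem.List.pyRange 0 grid.2 1).foldl (fun s _ => kmlRow grid.1 s) (res, ([] : List (List String)))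
  out.2

-- ===== PORT B =====
def key_map_to_list_alt (data : List (String × String)) (grid : Int × Int) : List (List String) :=
  let res := (PySem.Dict.ofList data).items.map (fun p => "[" ++ p.2 ++ "]" ++ " : " ++ "<" ++ p.1 ++ ">")
  let cols := max 0 grid.1
  let rows := max 0 grid.2
  let total := cols * rows
  let padded := PySem.List.slice res none (some total) ++ List.replicate (max 0 (total - (res.length : Int))).toNat ""
  (PySem.List.pyRange 0 rows 1).map (fun r => PySem.List.slice padded (some (r * cols)) (some ((r + 1) * cols)))

-- ===== PRECONDITION & SPEC =====
def Spec_key_map_to_list (data : List (String × String)) (grid : Int × Int) (out : List (List String)) : Prop := out = key_map_to_list_alt data grid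
instance (data : List (String × String)) (grid : Int × Int) (out : List (List String)) : Decidable (Spec_key_map_to_list data grid out) := by unfold Spec_key_map_to_list; infer_instance

-- ===== CLAIM (what is proved, stated in full; the proofs are below) =====
def Claim_equal_key_map_to_list : Prop := ∀ (data : List (String × String)) (grid : Int × Int), Dom_key_map_to_list data grid → Spec_key_map_to_list data grid (key_map_to_list data grid)

-- ===== LEMMAS AND PROOFS =====

-- abstract result both programs compute: n chunks of width c cut from res, padded with ""
def specChunks (c : Nat) : Nat → List String → List (List String)
  | 0, _ => []
  | n+1, res => (res.take c ++ List.replicate (c - res.length) "") :: specChunks c n (res.drop c)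

-- the padded pool B slices from
def paddedPool (c n : Nat) (res : List String) : List String :=
  res.take (c * n) ++ List.replicate (c * n - res.length) ""

-- ---- A side ----
lemma kml_inner (l : List Int) : ∀ (res col : List String),
    l.foldl (fun t _ => kmlCell t) (res, col) =
      (res.drop l.length, col ++ res.take l.length ++ List.replicate (l.length - res.length) "") := by
  induction l with
  | nil => intro res col; simp
  | cons h t ih =>
    intro res col
    cases res with
    | nil =>
      have hc : kmlCell ([], col) = ([], col ++ [""]) := by simp [kmlCell]
      rw [List.foldl_cons, hc, ih]
      simp [List.replicate_succ]
    | cons x xs =>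
      have hc : kmlCell (x :: xs, col) = (xs, col ++ [x]) := by
        simp [kmlCell, PySem.List.pop?_zero_cons]
      rw [List.foldl_cons, hc, ih]
      simp [List.append_assoc]

lemma kml_outer (g0 : Int) (l : List Int) : ∀ (res : List String) (acc : List (List String)),
    l.foldl (fun s _ => kmlRow g0 s) (res, acc) =
      (res.drop (g0.toNat * l.length), acc ++ specChunks g0.toNat l.length res) := by
  induction l with
  | nil => intro res acc; simp [specChunks]
  | cons h t ih =>
    intro res acc
    have hrow : kmlRow g0 (res, acc) =
        (res.drop g0.toNat, acc ++ [res.take g0.toNat ++ List.replicate (g0.toNat - res.length) ""]) := by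
      simp [kmlRow, kml_inner, PySem.List.length_pyRange_one]
    rw [List.foldl_cons, hrow, ih, Prod.mk.injEq]
    refine ⟨?_, ?_⟩
    · rw [List.drop_drop]; congr 1
      simp only [List.length_cons]; ring
    · simp [specChunks, List.append_assoc]

lemma kml_A_eq (data : List (String × String)) (grid : Int × Int) :
    key_map_to_list data grid =
      specChunks grid.1.toNat grid.2.toNat
        ((PySem.Dict.ofList data).items.map (fun p => "[" ++ p.2 ++ "]" ++ " : " ++ "<" ++ p.1 ++ ">")) := by
  simp only [key_map_to_list, kml_outer, PySem.List.length_pyRange_one, Int.sub_zero,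
    List.nil_append]
  congr 1
  -- res built by appending over keys with lookup  =  map over items
  rw [PySem.List.foldl_append_singleton_eq_map]
  have hkeys : (PySem.Dict.ofList data).keys = (PySem.Dict.ofList data).items.map Prod.fst := rfl
  rw [hkeys, List.map_map]
  apply List.map_congr_left
  rintro ⟨k, v⟩ hp
  have hget : (PySem.Dict.ofList data).getD k "" = v :=
    PySem.Dict.getD_of_mem_items _ hp (PySem.Dict.nodup_keys_ofList data) ""
  simp [hget]

-- ---- B side ----
lemma paddedPool_take (c n : Nat) (res : List String) (hn : 1 ≤ n) :
    (paddedPool c n res).take c = res.take c ++ List.replicate (c - res.length) "" := by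
  have hc : c ≤ c * n := Nat.le_mul_of_pos_right c hn
  unfold paddedPool
  rw [List.take_append, List.take_take, List.take_replicate, List.length_take]
  congr 1
  · congr 1; omega
  · congr 1; omega

lemma paddedPool_drop (c n : Nat) (res : List String) :
    (paddedPool c (n+1) res).drop c = paddedPool c n (res.drop c) := by
  have hm : c * (n+1) = c * n + c := by ring
  unfold paddedPool
  rw [hm, List.drop_append, List.drop_take, List.drop_replicate, List.length_take,
    List.length_drop]
  congr 1
  · congr 1; omega
  · congr 1; omega

lemma B_chunks (c : Nat) : ∀ (n : Nat) (res : List String),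
    (List.range n).map (fun k => ((paddedPool c n res).drop (k*c)).take c) = specChunks c n res := by
  intro n
  induction n with
  | zero => intro res; simp [specChunks]
  | succ m ih =>
    intro res
    rw [List.range_succ_eq_map, List.map_cons, List.map_map, specChunks]
    congr 1
    · simpa using paddedPool_take c (m+1) res (by omega)
    · rw [← ih (res.drop c)]
      apply List.map_congr_left
      intro k _
      simp only [Function.comp_apply]
      conv_lhs => rw [show Nat.succ k * c = c + k * c from by rw [Nat.succ_mul, Nat.add_comm], ← List.drop_drop,
        paddedPool_drop]

lemma alt_general (res : List String) (c n : Nat) :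
    (PySem.List.pyRange 0 (n : Int) 1).map (fun r =>
        PySem.List.slice
          (PySem.List.slice res none (some ((c : Int) * (n : Int))) ++
            List.replicate (max 0 ((c : Int) * (n : Int) - (res.length : Int))).toNat "")
          (some (r * (c : Int))) (some ((r + 1) * (c : Int)))) = specChunks c n res := by
  rw [show ((c : Int)) * (n : Int) = ((c * n : Nat) : Int) from by push_cast; ring,
    PySem.List.slice_to_natCast,
    show (max 0 (((c * n : Nat) : Int) - (res.length : Int))).toNat = c * n - res.length from by
      omega]
  have hB := B_chunks c n res
  unfold paddedPool at hB
  rw [PySem.List.pyRange_one, List.map_map,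
    show ((n : Int) - 0).toNat = n from by omega, ← hB]
  apply List.map_congr_left
  intro k _
  simp only [Function.comp_apply, zero_add]
  rw [show (k : Int) * (c : Int) = ((k * c : Nat) : Int) from by push_cast; ring,
    show ((k : Int) + 1) * (c : Int) = (((k + 1) * c : Nat) : Int) from by push_cast; ring,
    PySem.List.slice_natCast]
  congr 1
  rw [Nat.add_mul]
  omega

lemma kml_B_eq (data : List (String × String)) (grid : Int × Int) :
    key_map_to_list_alt data grid =
      specChunks grid.1.toNat grid.2.toNat
        ((PySem.Dict.ofList data).items.map (fun p => "[" ++ p.2 ++ "]" ++ " : " ++ "<" ++ p.1 ++ ">")) := by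
  have hcols : max 0 grid.1 = ((grid.1.toNat : Nat) : Int) := by omega
  have hrows : max 0 grid.2 = ((grid.2.toNat : Nat) : Int) := by omega
  simp only [key_map_to_list_alt]
  rw [hcols, hrows]
  exact alt_general _ _ _

-- ===== VERDICT (by name: the statement is the Claim_ definition above) =====
theorem key_map_to_list_spec : Claim_equal_key_map_to_list := by
  intro data grid _
  unfold Spec_key_map_to_list
  rw [kml_A_eq, kml_B_eq]
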